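-- pv_equiv track=rewrite | github.com/Egoty62/Coding_Test_Study | Level_1/20230929/대충_만든_자판.py | solution
-- ===== SOURCE A (Python) =====
-- def solution(keymap, targets):
--     answer = []
--     for i in targets :
--         a = 0
--         for j in i :
--             try :
--                 a += min([key.find(j) + 1 for key in keymap if key.find(j) != -1])
--             except ValueError :
--                 a = -1
--                 break
--         answer.append(a)
--     return answer
-- ===== SOURCE B (Python) =====
-- def solution(keymap, targets):
--     # Build, in one pass over the keymap, the minimum 1-based press position per char.
--     pos = {}
--     for key in keymap:
--         for idx, ch in enumerate(key):
--             p = idx + 1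
--             if ch not in pos or p < pos[ch]:
--                 pos[ch] = p
--     return [sum(pos[c] for c in t) if all(c in pos for c in t) else -1
--             for t in targets]
-- ===== Notes on version B (the rewrite author's own statement) =====
-- stated objective: faster
-- what changed: B precomputes one dict of each character's minimum key-press position in a single pass over the keymap, then answers each target with a membership check plus a sum, replacing A's per-character rescan of the whole keymap (with str.find) and its try/except-ValueError break control flow.
import Mathlib
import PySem

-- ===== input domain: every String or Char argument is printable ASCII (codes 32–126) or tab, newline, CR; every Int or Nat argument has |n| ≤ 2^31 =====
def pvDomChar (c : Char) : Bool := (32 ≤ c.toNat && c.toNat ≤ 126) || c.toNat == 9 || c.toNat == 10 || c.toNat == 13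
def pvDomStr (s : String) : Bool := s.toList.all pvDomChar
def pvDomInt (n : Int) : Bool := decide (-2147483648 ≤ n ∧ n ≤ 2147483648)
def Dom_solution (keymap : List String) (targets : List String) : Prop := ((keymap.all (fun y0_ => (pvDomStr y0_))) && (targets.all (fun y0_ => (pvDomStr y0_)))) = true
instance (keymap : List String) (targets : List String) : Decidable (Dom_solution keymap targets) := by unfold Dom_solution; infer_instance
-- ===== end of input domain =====

-- B replaces A's per-character rescan of the whole keymap by a dict of minimum press
-- positions built once; objective: faster (one pass over the keymap instead of one per target character).

-- ===== PORT A =====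
-- [key.find(j) + 1 for key in keymap if key.find(j) != -1]
def pvCand (keymap : List String) (j : Char) : List Int :=
  (keymap.filter (fun key => PySem.Str.find key (String.singleton j) != -1)).map
    (fun key => PySem.Str.find key (String.singleton j) + 1)

-- the inner 'for j in i' loop with its try/except ValueError + break
-- (Python's min([]) raises ValueError; PySem.List.min? returns none exactly there)
def pvLoopA (keymap : List String) : List Char → Int → Int
  | [], a => a
  | j :: rest, a =>
    match PySem.List.min? (pvCand keymap j) (fun x => x) with
    | some m => pvLoopA keymap rest (a + m)
    | none => -1

def solution (keymap : List String) (targets : List String) : List Int :=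
  targets.map (fun i => pvLoopA keymap i.toList 0)

-- ===== PORT B =====
-- if ch not in pos or p < pos[ch]: pos[ch] = p
def pvStep (d : PySem.Dict Char Int) (p : Int × Char) : PySem.Dict Char Int :=
  match d.get? p.2 with
  | none => d.insert p.2 (p.1 + 1)
  | some v => if p.1 + 1 < v then d.insert p.2 (p.1 + 1) else d

def pvBuildPos (keymap : List String) : PySem.Dict Char Int :=
  keymap.foldl (fun d key => (PySem.List.enumerate key.toList).foldl pvStep d) PySem.Dict.empty

def solution_alt (keymap : List String) (targets : List String) : List Int :=
  let pos := pvBuildPos keymap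
  targets.map (fun t =>
    if t.toList.all (fun c => (pos.get? c).isSome) then
      -- sum(pos[c] for c in t); every c is present here, so getD's default is never used
      t.toList.foldl (fun s c => s + pos.getD c 0) 0
    else -1)

-- ===== PRECONDITION & SPEC =====
def Spec_solution (keymap : List String) (targets : List String) (out : List Int) : Prop := out = solution_alt keymap targets
instance (keymap : List String) (targets : List String) (out : List Int) : Decidable (Spec_solution keymap targets out) := by unfold Spec_solution; infer_instance

-- ===== CLAIM (what is proved, stated in full; the proofs are below) =====
def Claim_equal_solution : Prop := ∀ (keymap : List String) (targets : List String), Dom_solution keymap targets → Spec_solution keymap targets (solution keymap targets)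

-- ===== LEMMAS AND PROOFS =====

-- min of two optional candidates (none = no candidate)
def optMin : Option Int → Option Int → Option Int
  | none, o => o
  | some a, none => some a
  | some a, some b => some (min a b)

theorem optMin_none_right (o : Option Int) : optMin o none = o := by cases o <;> rfl

theorem optMin_assoc (a b c : Option Int) : optMin (optMin a b) c = optMin a (optMin b c) := by
  cases a <;> cases b <;> cases c <;> simp [optMin, min_assoc]

-- min press position (1-based, offset s) of c among the occurrences in a char list
def occMin (c : Char) : List Char → Int → Option Int
  | [], _ => none
  | x :: xs, s => if x == c then optMin (some (s + 1)) (occMin c xs (s + 1)) else occMin c xs (s + 1)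

theorem occMin_lb (c : Char) (l : List Char) : ∀ (s v : Int), occMin c l s = some v → s + 1 ≤ v := by
  induction l with
  | nil => intro s v h; simp [occMin] at h
  | cons x xs ih =>
    intro s v h
    simp only [occMin] at h
    split at h
    · cases hx : occMin c xs (s + 1) with
      | none => rw [hx] at h; simp [optMin] at h; omega
      | some w =>
        have := ih (s + 1) w hx
        rw [hx] at h; simp [optMin] at h; omega
    · have := ih (s + 1) v h; omega

theorem occMin_eq_findIdx (c : Char) (l : List Char) (s : Int) :
    occMin c l s = (List.findIdx? (fun x => x == c) l).map (fun n => s + n + 1) := by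
  induction l generalizing s with
  | nil => simp [occMin]
  | cons x xs ih =>
    simp only [occMin, List.findIdx?_cons]
    by_cases hx : x == c
    · simp only [hx]
      cases ho : occMin c xs (s + 1) with
      | none => simp [optMin]
      | some w =>
        have := occMin_lb c xs (s + 1) w ho
        simp [optMin]; omega
    · simp only [hx]
      rw [ih (s + 1)]
      cases List.findIdx? (fun x => x == c) xs <;> simp <;> ring_nf

-- [c] is a prefix of m iff m starts with c
theorem singleton_prefix (c : Char) (m : List Char) : [c] <+: m ↔ m.head? = some c := by
  constructor
  · rintro ⟨t, ht⟩; subst ht; rfl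
  · intro h
    cases m with
    | nil => simp at h
    | cons x xs => simp at h; subst h; exact ⟨xs, rfl⟩

-- Python's s.find(c) for a single character is the first index of c (or -1)
theorem findChar (l : List Char) (c : Char) :
    PySem.Chars.find l [c] = (List.findIdx? (fun x => x == c) l).elim (-1) (fun n => (n : Int)) := by
  by_cases h : [c] <:+: l
  · have h0 : 0 ≤ PySem.Chars.find l [c] := (PySem.Chars.find_nonneg_iff l [c]).2 h
    obtain ⟨hpre, hmin⟩ := PySem.Chars.find_spec h0
    set n := (PySem.Chars.find l [c]).toNat with hn
    have hget : l[n]? = some c := by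
      rw [← List.head?_drop]; exact (singleton_prefix c _).1 hpre
    have hlen : n < l.length := (List.getElem?_eq_some_iff.1 hget).1
    have hidx : List.findIdx? (fun x => x == c) l = some n := by
      rw [List.findIdx?_eq_some_iff_getElem]
      refine ⟨hlen, by simpa using (List.getElem?_eq_some_iff.1 hget).2, ?_⟩
      intro j hj hpj
      apply hmin j hj
      rw [singleton_prefix, List.head?_drop]
      exact List.getElem?_eq_some_iff.2 ⟨lt_trans hj hlen, by simpa using hpj⟩
    rw [hidx]; simp [Option.elim]; omega
  · rw [(PySem.Chars.find_eq_neg_one_iff l [c]).2 h]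
    have : List.findIdx? (fun x => x == c) l = none := by
      rw [List.findIdx?_eq_none_iff]
      intro x hx
      by_contra hb
      simp only [Bool.not_eq_false, beq_iff_eq] at hb
      subst hb
      obtain ⟨s, t, hst⟩ := List.append_of_mem hx
      exact h ⟨s, t, by simp [hst]⟩
    rw [this]; rfl

-- the candidate list's min, written as a foldr of optMin
theorem foldl_min_shift (ys : List Int) : ∀ x y, min x (ys.foldl min y) = ys.foldl min (min x y) := by
  induction ys with
  | nil => intro x y; rfl
  | cons z zs ih =>
    intro x y
    simp only [List.foldl_cons]
    rw [ih x (min y z), min_assoc]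

theorem foldr_optMin_cons (t : List Int) : ∀ (x : Int),
    (x :: t).foldr (fun x o => optMin (some x) o) none = some (t.foldl min x) := by
  induction t with
  | nil => intro x; rfl
  | cons y ys ih =>
    intro x
    rw [List.foldr_cons, ih y]
    simp [optMin, List.foldl_cons, foldl_min_shift]

theorem minId_foldr (l : List Int) :
    PySem.List.min? l (fun y => y) = l.foldr (fun x o => optMin (some x) o) none := by
  cases l with
  | nil => rw [(PySem.List.min?_eq_none_iff [] _).2 rfl]; rfl
  | cons x t => rw [PySem.List.min?_id_cons, foldr_optMin_cons]

-- per-key optional candidate on the A side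
def keyOpt (c : Char) (key : String) : Option Int :=
  if PySem.Str.find key (String.singleton c) != -1 then some (PySem.Str.find key (String.singleton c) + 1) else none

theorem keyOpt_eq_occMin (c : Char) (key : String) : keyOpt c key = occMin c key.toList 0 := by
  rw [occMin_eq_findIdx]
  unfold keyOpt
  rw [PySem.Str.find_eq, String.toList_singleton, findChar]
  cases List.findIdx? (fun x => x == c) key.toList with
  | none => rfl
  | some n =>
    have hne : (((n : Int)) != -1) = true := bne_iff_ne.mpr (by omega)
    simp [hne]

theorem cand_foldr (keymap : List String) (c : Char) :
    (pvCand keymap c).foldr (fun x o => optMin (some x) o) none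
      = keymap.foldr (fun k o => optMin (keyOpt c k) o) none := by
  induction keymap with
  | nil => rfl
  | cons k ks ih =>
    simp only [pvCand, List.filter_cons] at ih ⊢
    by_cases h : (PySem.Str.find k (String.singleton c) != -1) = true
    · rw [if_pos h]
      simp only [List.map_cons, List.foldr_cons, ih, keyOpt, if_pos h]
    · rw [if_neg h]
      rw [ih]
      simp only [List.foldr_cons, keyOpt, if_neg h, optMin]

-- the dict built by B: inner fold over one key
theorem get?_inner (c : Char) (l : List Char) : ∀ (s : Int) (d : PySem.Dict Char Int),
    ((PySem.List.enumerate l s).foldl pvStep d).get? c = optMin (d.get? c) (occMin c l s) := by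
  induction l with
  | nil => intro s d; rw [PySem.List.enumerate_nil]; simp [occMin, optMin_none_right]
  | cons x xs ih =>
    intro s d
    rw [PySem.List.enumerate_cons]
    simp only [List.foldl_cons]
    rw [ih (s + 1) (pvStep d (s, x))]
    have hstep : (pvStep d (s, x)).get? c
        = if x == c then optMin (d.get? c) (some (s + 1)) else d.get? c := by
      by_cases hx : x = c
      · subst hx
        simp only [beq_self_eq_true, if_true]
        unfold pvStep
        cases hd : d.get? x with
        | none => simp [PySem.Dict.get?_insert_self, optMin]
        | some v =>
          simp only
          by_cases hlt : s + 1 < v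
          · rw [if_pos hlt, PySem.Dict.get?_insert_self]
            simp only [optMin]
            congr 1
            omega
          · rw [if_neg hlt, hd]
            simp only [optMin]
            congr 1
            omega
      · have hbx : (x == c) = false := by simp [hx]
        rw [hbx, if_neg (by simp)]
        unfold pvStep
        cases hd : d.get? x with
        | none => exact PySem.Dict.get?_insert_of_ne d _ (Ne.symm hx)
        | some v =>
          simp only
          split
          · exact PySem.Dict.get?_insert_of_ne d _ (Ne.symm hx)
          · rfl
    rw [hstep]
    simp only [occMin]
    by_cases hx : x == c
    · rw [if_pos hx, if_pos hx, optMin_assoc]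
    · rw [if_neg hx, if_neg hx]

theorem get?_build (c : Char) (keymap : List String) :
    (pvBuildPos keymap).get? c = keymap.foldr (fun k o => optMin (occMin c k.toList 0) o) none := by
  unfold pvBuildPos
  suffices h : ∀ (ks : List String) (d : PySem.Dict Char Int),
      (ks.foldl (fun d key => (PySem.List.enumerate key.toList).foldl pvStep d) d).get? c
        = optMin (d.get? c) (ks.foldr (fun k o => optMin (occMin c k.toList 0) o) none) by
    rw [h keymap PySem.Dict.empty, PySem.Dict.get?_empty]; rfl
  intro ks
  induction ks with
  | nil => intro d; simp [optMin_none_right]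
  | cons k rest ih =>
    intro d
    simp only [List.foldl_cons, List.foldr_cons]
    rw [ih, get?_inner, optMin_assoc]

-- the two sides agree on each character's best press cost
theorem min?_eq_get? (keymap : List String) (c : Char) :
    PySem.List.min? (pvCand keymap c) (fun x => x) = (pvBuildPos keymap).get? c := by
  rw [minId_foldr, cand_foldr, get?_build]
  congr 1
  funext k o
  rw [keyOpt_eq_occMin]

-- the per-target loop of A computed from B's dict
theorem loopA_eq (keymap : List String) (cs : List Char) : ∀ (a : Int),
    pvLoopA keymap cs a
      = if cs.all (fun c => ((pvBuildPos keymap).get? c).isSome) then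
          cs.foldl (fun s c => s + (pvBuildPos keymap).getD c 0) a
        else -1 := by
  induction cs with
  | nil => intro a; rfl
  | cons c rest ih =>
    intro a
    simp only [pvLoopA, List.all_cons, List.foldl_cons]
    rw [min?_eq_get?]
    cases hc : (pvBuildPos keymap).get? c with
    | none =>
      have hm : (match (none : Option Int) with
          | some m => pvLoopA keymap rest (a + m) | none => (-1 : Int)) = -1 := rfl
      rw [hm]
      rw [show ((none : Option Int).isSome && rest.all fun c => ((pvBuildPos keymap).get? c).isSome) = false from rfl]
      rw [if_neg (by simp)]
    | some m =>
      have hD : (pvBuildPos keymap).getD c 0 = m := by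
        have h2 : (pvBuildPos keymap).getD c 0 = ((pvBuildPos keymap).get? c).getD 0 := by
          simp [PySem.Dict.getD, PySem.Dict.get?]
        rw [h2, hc]
        rfl
      have hm : (match (some m : Option Int) with
          | some m => pvLoopA keymap rest (a + m) | none => (-1 : Int))
            = pvLoopA keymap rest (a + m) := rfl
      rw [hm, ih (a + m), hD]
      simp only [Option.isSome_some, Bool.true_and]

-- ===== VERDICT (by name: the statement is the Claim_ definition above) =====
theorem solution_spec : Claim_equal_solution := by
  intro keymap targets _
  unfold Spec_solution solution solution_alt
  apply List.map_congr_left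
  intro t _
  exact loopA_eq keymap t.toList 0
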